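-- pv_equiv track=rewrite | github.com/cgml/algorithms-python | src/cgml/ik/dp/word_break_count_dp.py | wordBreakCount
-- ===== SOURCE A (Python) =====
-- def wordBreakCount(dictionary, txt):
--     # Write your code here
--     word_set = set()
--     word_len = set()
--     for word in dictionary:
--         word_set.add(word)
--         word_len.add(len(word))
--
--     n = len(txt)
--     wbc = [0 for i in range(n + 1)]
--
--     for idx in range(1, (n + 1)):
--
--         if txt[0:idx] in word_set:
--             wbc[idx] += 1
--
--         for l in word_len:
--             if idx - l >= 0:
--
--                 if idx - l >= 0 and txt[idx - l:idx] in word_set: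
--                     wbc[idx] += wbc[idx - l]
--     return wbc[n] % 1000000007
-- ===== SOURCE B (Python) =====
-- def wordBreakCount(dictionary, txt):
--     words = set(dictionary)
--     memo = {}
--
--     def count(idx):
--         if idx in memo:
--             return memo[idx]
--         total = 0
--         for w in words:
--             l = len(w)
--             if 0 < l <= idx and txt[idx - l:idx] == w:
--                 total += count(idx - l) if l < idx else 1
--         memo[idx] = total
--         return total
--
--     return count(len(txt)) % 1000000007
-- ===== Notes on version B (the rewrite author's own statement) =====
-- stated objective: alternative
-- what changed: A's bottom-up DP table with a whole-prefix bonus and an inner scan over the set of distinct word lengths is replaced by a top-down memoized recursion on prefix length that sums directly over the distinct words (the last word of a decomposition), with no length set and no prefix special case.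
-- outside the precondition, e.g. on wordBreakCount(['', 'a'], 'aa'): A returns 2, B returns 1
import Mathlib
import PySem

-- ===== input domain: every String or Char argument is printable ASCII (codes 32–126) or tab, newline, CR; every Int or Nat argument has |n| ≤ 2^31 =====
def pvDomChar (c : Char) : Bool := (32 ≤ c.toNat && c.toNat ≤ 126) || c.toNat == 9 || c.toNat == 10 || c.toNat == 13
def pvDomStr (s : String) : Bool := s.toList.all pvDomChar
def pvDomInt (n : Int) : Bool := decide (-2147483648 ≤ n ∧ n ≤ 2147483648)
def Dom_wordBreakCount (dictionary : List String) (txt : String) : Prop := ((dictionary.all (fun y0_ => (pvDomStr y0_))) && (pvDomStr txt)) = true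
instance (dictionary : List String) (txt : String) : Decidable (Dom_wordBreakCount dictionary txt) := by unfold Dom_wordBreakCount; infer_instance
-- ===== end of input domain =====

-- B replaces A's bottom-up DP table (whole-prefix bonus + inner scan over the set of
-- distinct word lengths) by a top-down memoized recursion on the prefix length that sums
-- directly over the distinct words (the last word of a decomposition): objective 'alternative'.

-- ===== PORT A =====
def wordBreakCount (dictionary : List String) (txt : String) : Int :=
  let sets := dictionary.foldl
    (fun (p : PySem.Set String × PySem.Set Int) word =>
      (PySem.Set.add p.1 word, PySem.Set.add p.2 (PySem.Str.len word)))
    (PySem.Set.empty, PySem.Set.empty)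
  let n : Int := PySem.Str.len txt
  let wbc0 : List Int := (PySem.List.pyRange 0 (n + 1) 1).map (fun _ => (0 : Int))
  let wbc := (PySem.List.pyRange 1 (n + 1) 1).foldl (fun wbc idx =>
    -- 'wbc[idx] += …' is accumulated in v and stored once (same cell values: the inner
    -- loop reads wbc only at indices idx-l < idx)
    let v1 : Int :=
      if PySem.Set.contains sets.1 (PySem.Str.slice txt (some 0) (some idx))
      then PySem.List.pyGetD wbc idx 0 + 1
      else PySem.List.pyGetD wbc idx 0
    let v2 : Int := sets.2.foldl (fun v l =>
      if idx - l ≥ 0 then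
        (if idx - l ≥ 0 ∧ PySem.Set.contains sets.1 (PySem.Str.slice txt (some (idx - l)) (some idx))
         then v + PySem.List.pyGetD wbc (idx - l) 0
         else v)
      else v) v1
    PySem.List.pySetD wbc idx v2) wbc0
  PySem.Int.mod (PySem.List.pyGetD wbc n 0) 1000000007

-- ===== PORT B =====
-- Source B's memoized top-down recursion 'count'; the memo table is pure caching and is
-- dropped in the port (the recursion computes the same values).
mutual
def wbAltGo (txt : String) (words : List String) (idx : Nat) : Int :=
  wbAltInner txt words idx words 0
termination_by (idx, words.length + 1)

def wbAltInner (txt : String) (words : List String) (idx : Nat) : List String → Int → Int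
  | [], total => total
  | w :: rest, total =>
      let l := w.toList.length
      wbAltInner txt words idx rest
        (if h : 0 < l ∧ l ≤ idx ∧
              PySem.Str.slice txt (some ((idx : Int) - (l : Int))) (some (idx : Int)) = w
         then total + (if l < idx then wbAltGo txt words (idx - l) else 1)
         else total)
termination_by ws => (idx, ws.length)
decreasing_by
· obtain ⟨hl1, hl2, -⟩ := h
  exact Prod.Lex.left _ _ (by omega)
· exact Prod.Lex.right _ (by simp)
end

def wordBreakCount_alt (dictionary : List String) (txt : String) : Int :=
  let words := PySem.Set.ofList dictionary
  PySem.Int.mod (wbAltGo txt words txt.toList.length) 1000000007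

-- ===== PRECONDITION & SPEC =====
-- Pre_ excludes dictionaries that contain the empty string alongside other words when txt
-- is nonempty: there the length-0 term makes A's result depend on CPython's set-iteration
-- order (it doubles the partially accumulated DP cell), an accident of A's implementation
-- (with txt = "" or a dictionary of only empty strings every cell stays 0, so those stay in).
def Pre_wordBreakCount (dictionary : List String) (txt : String) : Prop :=
  "" ∉ dictionary ∨ txt = "" ∨ ∀ w ∈ dictionary, w = ""
instance (dictionary : List String) (txt : String) : Decidable (Pre_wordBreakCount dictionary txt) := by unfold Pre_wordBreakCount; infer_instance
def pvWitness_wordBreakCount : List String × String := (["aa", "a", "b"], "aab")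
def Spec_wordBreakCount (dictionary : List String) (txt : String) (out : Int) : Prop := out = wordBreakCount_alt dictionary txt
instance (dictionary : List String) (txt : String) (out : Int) : Decidable (Spec_wordBreakCount dictionary txt out) := by unfold Spec_wordBreakCount; infer_instance

-- ===== CLAIM (what is proved, stated in full; the proofs are below) =====
def Claim_equal_wordBreakCount : Prop := ∀ (dictionary : List String) (txt : String), Dom_wordBreakCount dictionary txt → Pre_wordBreakCount dictionary txt → Spec_wordBreakCount dictionary txt (wordBreakCount dictionary txt)

-- ===== LEMMAS AND PROOFS =====

-- the summand of B's inner loop over the words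
def wbF (txt : String) (D : List String) (idx : Nat) (w : String) : Int :=
  if 0 < w.toList.length ∧ w.toList.length ≤ idx ∧
      PySem.Str.slice txt (some ((idx : Int) - (w.toList.length : Int))) (some (idx : Int)) = w
  then (if w.toList.length < idx then wbAltGo txt D (idx - w.toList.length) else 1)
  else 0

-- the summand of A's inner loop over the distinct lengths (wprev = the DP list so far)
def wbG (txt : String) (D : List String) (wprev : List Int) (idx l : Int) : Int :=
  if idx - l ≥ 0 ∧ PySem.Set.contains D (PySem.Str.slice txt (some (idx - l)) (some idx))
  then PySem.List.pyGetD wprev (idx - l) 0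
  else 0

lemma wbAltInner_eq_sum (txt : String) (D : List String) (idx : Nat)
    (ws : List String) (t : Int) :
    wbAltInner txt D idx ws t = t + (ws.map (wbF txt D idx)).sum := by
  induction ws generalizing t with
  | nil => simp [wbAltInner]
  | cons w rest ih =>
      rw [wbAltInner, ih]
      simp only [wbF, List.map_cons, List.sum_cons]
      split
      · ring
      · ring
lemma wbAltGo_eq_sum (txt : String) (D : List String) (idx : Nat) :
    wbAltGo txt D idx = (D.map (wbF txt D idx)).sum := by
  rw [wbAltGo, wbAltInner_eq_sum]; ring
lemma wbAltGo_zero (txt : String) (D : List String) : wbAltGo txt D 0 = 0 := by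
  rw [wbAltGo_eq_sum]
  apply List.sum_eq_zero
  intro x hx
  obtain ⟨w, hw, rfl⟩ := List.mem_map.mp hx
  simp only [wbF]
  rw [if_neg]
  rintro ⟨h1, h2, -⟩
  omega
lemma wbAltGo_all_empty (txt : String) (D : List String) (hall : ∀ w ∈ D, w = "")
    (idx : Nat) : wbAltGo txt D idx = 0 := by
  rw [wbAltGo_eq_sum]
  apply List.sum_eq_zero
  intro x hx
  obtain ⟨w, hw, rfl⟩ := List.mem_map.mp hx
  have := hall w hw
  subst this
  simp [wbF]

lemma sum_map_filter_split {α : Type} (D : List α) (p : α → Bool) (F : α → Int) :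
    (D.map F).sum = ((D.filter p).map F).sum + ((D.filter (fun w => !p w)).map F).sum := by
  induction D with
  | nil => simp
  | cons w rest ih =>
      by_cases h : p w <;> simp [h, ih] <;> ring
lemma sum_if_single {α : Type} [DecidableEq α] (P : List α) (hP : P.Nodup) (s : α) (g : Int) :
    (P.map (fun w => if w = s then g else 0)).sum = if s ∈ P then g else 0 := by
  induction P with
  | nil => simp
  | cons w rest ih =>
      simp only [List.map_cons, List.sum_cons, List.mem_cons, List.nodup_cons] at *
      by_cases h : w = s
      · subst h
        simp [hP.1, ih hP.2]
      · simp [h, ih hP.2, Ne.symm h]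
lemma sum_groups {α β : Type} [DecidableEq β]
    (L : List β) (D : List α) (hL : L.Nodup)
    (f : α → β) (hcov : ∀ w ∈ D, f w ∈ L)
    (F : α → Int) (G : β → Int)
    (hfiber : ∀ l ∈ L, ((D.filter (fun w => decide (f w = l))).map F).sum = G l) :
    (D.map F).sum = (L.map G).sum := by
  induction L generalizing D with
  | nil =>
      cases D with
      | nil => simp
      | cons w t => exact absurd (hcov w (by simp)) (by simp)
  | cons l L' ih =>
      rw [sum_map_filter_split D (fun w => decide (f w = l)) F]
      rw [hfiber l (by simp)]
      rw [List.map_cons, List.sum_cons]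
      congr 1
      apply ih (D.filter (fun w => !decide (f w = l))) (List.nodup_cons.mp hL).2
      · intro w hw
        have hmem := List.mem_filter.mp hw
        have := hcov w hmem.1
        simp only [List.mem_cons] at this
        rcases this with h | h
        · simp [h] at hmem
        · exact h
      · intro l' hl'
        rw [List.filter_filter]
        have : ∀ w ∈ D, (decide (f w = l') && !decide (f w = l)) = decide (f w = l') := by
          intro w _
          have hll : l' ≠ l := fun hc => (List.nodup_cons.mp hL).1 (hc ▸ hl')
          by_cases h : f w = l'
          · simp [h, hll]
          · simp [h]
        rw [List.filter_congr this]
        exact hfiber l' (by simp [hl'])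
lemma slice_len (txt : String) (a b : Nat) (hab : a ≤ b) (hb : b ≤ txt.toList.length) :
    (PySem.Str.slice txt (some (a : Int)) (some (b : Int))).toList.length = b - a := by
  rw [PySem.Str.toList_slice]
  unfold PySem.Chars.slice
  rw [PySem.List.slice_natCast]
  simp only [List.length_take, List.length_drop]
  omega

-- per-cell equality: A's value for cell idx equals B's recursion at idx
lemma cell_eq (dict : List String) (txt : String) (hpre : "" ∉ dict)
    (idx : Nat) (h1 : 1 ≤ idx) (hn : idx ≤ txt.toList.length)
    (wprev : List Int)
    (hw : ∀ j : Nat, j < idx →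
      PySem.List.pyGetD wprev (j : Int) 0 = wbAltGo txt (PySem.Set.ofList dict) j)
    (hidx : PySem.List.pyGetD wprev (idx : Int) 0 = 0) :
    (if PySem.Set.contains (PySem.Set.ofList dict)
          (PySem.Str.slice txt (some 0) (some (idx : Int)))
     then PySem.List.pyGetD wprev (idx : Int) 0 + 1
     else PySem.List.pyGetD wprev (idx : Int) 0)
    + ((PySem.Set.ofList (dict.map PySem.Str.len)).map
        (wbG txt (PySem.Set.ofList dict) wprev (idx : Int))).sum
    = wbAltGo txt (PySem.Set.ofList dict) idx := by
  set D := PySem.Set.ofList dict with hDdef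
  set L := PySem.Set.ofList (dict.map PySem.Str.len) with hLdef
  have hD : D.Nodup := PySem.Set.nodup_ofList dict
  have hL : L.Nodup := PySem.Set.nodup_ofList _
  have hmemD : ∀ w : String, w ∈ D ↔ w ∈ dict := fun w => PySem.Set.mem_ofList dict w
  have hmemL : ∀ l : Int, l ∈ L ↔ ∃ w ∈ dict, PySem.Str.len w = l := by
    intro l
    rw [hLdef, PySem.Set.mem_ofList, List.mem_map]
  have hlen1 : ∀ w ∈ dict, 1 ≤ w.toList.length := by
    intro w hwmem
    have hne : w ≠ "" := fun h => hpre (h ▸ hwmem)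
    have : w.toList ≠ [] := fun h => hne (String.toList_eq_nil_iff.mp h)
    have := List.length_pos_of_ne_nil this
    omega
  set bonus : Int :=
    if PySem.Set.contains D (PySem.Str.slice txt (some 0) (some (idx : Int))) then 1 else 0
    with hbonus
  set G' : Int → Int :=
    fun l => wbG txt D wprev (idx : Int) l + (if l = (idx : Int) then bonus else 0) with hG'
  rw [wbAltGo_eq_sum]
  have key : (D.map (wbF txt D idx)).sum = (L.map G').sum := by
    apply sum_groups L D hL PySem.Str.len ?cov (wbF txt D idx) G' ?fib
    case cov =>
      intro w hwD
      rw [hmemL]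
      exact ⟨w, (hmemD w).mp hwD, rfl⟩
    case fib =>
      intro l hlL
      obtain ⟨w0, hw0d, hw0l⟩ := (hmemL l).mp hlL
      have hl1 : 1 ≤ w0.toList.length := hlen1 w0 hw0d
      have hlcast : l = (w0.toList.length : Int) := by
        rw [← hw0l]; simp [PySem.Str.len_eq]
      set lN : Nat := w0.toList.length with hlN
      by_cases hle : lN ≤ idx
      · -- length fits: at most one word of this length matches the slice
        have hcast : (idx : Int) - l = ((idx - lN : Nat) : Int) := by
          rw [hlcast]; omega
        set s := PySem.Str.slice txt (some ((idx : Int) - l)) (some (idx : Int)) with hs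
        have hslen : s.toList.length = lN := by
          rw [hs, hcast]
          have hc : ((idx : Nat) : Int) = (idx : Int) := rfl
          rw [slice_len txt (idx - lN) idx (by omega) hn]
          omega
        set g : Int := if lN < idx then wbAltGo txt D (idx - lN) else 1 with hg
        have hmap : (D.filter fun w => decide (PySem.Str.len w = l)).map (wbF txt D idx)
            = (D.filter fun w => decide (PySem.Str.len w = l)).map
                (fun w => if w = s then g else 0) := by
          apply List.map_congr_left
          intro w hwmem
          have hwl : (w.toList.length : Int) = l := by
            have := (List.mem_filter.mp hwmem).2
            simpa [PySem.Str.len_eq] using this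
          have hwlN : w.toList.length = lN := by
            rw [hlcast] at hwl; exact_mod_cast hwl
          simp only [wbF, hwlN]
          have hiff : (0 < lN ∧ lN ≤ idx ∧
              PySem.Str.slice txt (some ((idx : Int) - (lN : Int))) (some (idx : Int)) = w)
              ↔ (w = s) := by
            constructor
            · rintro ⟨-, -, h⟩
              rw [← h, hs, hlcast]
            · intro h
              refine ⟨by omega, hle, ?_⟩
              rw [h, hs, hlcast]
          rw [if_congr hiff rfl rfl]
        rw [hmap, sum_if_single _ (List.Nodup.filter _ hD) s g]
        have hsmem : (s ∈ D.filter fun w => decide (PySem.Str.len w = l)) ↔ s ∈ D := by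
          rw [List.mem_filter]
          constructor
          · exact And.left
          · intro h
            refine ⟨h, ?_⟩
            simp [PySem.Str.len_eq, hslen, hlcast]
        rw [if_congr hsmem rfl rfl]
        simp only [hG']
        rw [show wbG txt D wprev (idx : Int) l
            = (if ((idx : Int) - l ≥ 0 ∧ PySem.Set.contains D s)
               then PySem.List.pyGetD wprev ((idx : Int) - l) 0 else 0) from by rw [wbG, hs]]
        by_cases hlt : lN < idx
        · have hne : l ≠ (idx : Int) := by
            rw [hlcast]; exact_mod_cast Nat.ne_of_lt hlt
          have hpg : PySem.List.pyGetD wprev ((idx : Int) - l) 0 = wbAltGo txt D (idx - lN) := by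
            rw [hcast]; exact hw (idx - lN) (by omega)
          have hge : (idx : Int) - l ≥ 0 := by rw [hlcast]; omega
          rw [if_neg hne, hg, if_pos hlt]
          by_cases hsD : s ∈ D
          · have hcont : PySem.Set.contains D s = true := by
              simp [PySem.Set.contains, hsD]
            rw [if_pos hsD, if_pos ⟨hge, hcont⟩, hpg]
            ring
          · have hcont : ¬ (PySem.Set.contains D s = true) := by
              simp [PySem.Set.contains, hsD]
            rw [if_neg hsD, if_neg (fun hcc => hcont hcc.2)]
            ring
        · have hEq : lN = idx := by omega
          have heq' : l = (idx : Int) := by rw [hlcast]; exact_mod_cast hEq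
          have hz : (idx : Int) - l = 0 := by rw [heq']; ring
          have hpg0 : PySem.List.pyGetD wprev ((idx : Int) - l) 0 = 0 := by
            rw [hz]
            have h00 := hw 0 (by omega)
            rw [wbAltGo_zero] at h00
            exact_mod_cast h00
          have hsb : PySem.Str.slice txt (some 0) (some (idx : Int)) = s := by
            rw [hs, hz]
          rw [if_pos heq', hg, if_neg (by omega : ¬ lN < idx), hbonus, hsb]
          by_cases hsD : s ∈ D
          · have hcont : PySem.Set.contains D s = true := by
              simp [PySem.Set.contains, hsD]
            rw [if_pos hsD, if_pos ⟨by omega, hcont⟩, hpg0, if_pos hcont]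
            ring
          · have hcont : ¬ (PySem.Set.contains D s = true) := by
              simp [PySem.Set.contains, hsD]
            rw [if_neg hsD, if_neg (fun hcc => hcont hcc.2), if_neg hcont]
            ring
      · -- length longer than the prefix: both sides vanish
        have h1 : ((D.filter fun w => decide (PySem.Str.len w = l)).map (wbF txt D idx)).sum
            = 0 := by
          apply List.sum_eq_zero
          intro x hx
          obtain ⟨w, hwmem, rfl⟩ := List.mem_map.mp hx
          have hwl : (w.toList.length : Int) = l := by
            have := (List.mem_filter.mp hwmem).2
            simpa [PySem.Str.len_eq] using this
          have hwlN : w.toList.length = lN := by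
            rw [hlcast] at hwl; exact_mod_cast hwl
          simp only [wbF, hwlN]
          rw [if_neg]
          rintro ⟨-, h2, -⟩
          omega
        have hwgz : wbG txt D wprev (idx : Int) l = 0 := by
          rw [wbG, if_neg]
          rintro ⟨hge, -⟩
          rw [hlcast] at hge
          omega
        have hne : l ≠ (idx : Int) := by
          rw [hlcast]
          intro hc
          have : lN = idx := by exact_mod_cast hc
          omega
        rw [h1]
        simp [hG', hwgz, hne]
  rw [key, hG']
  rw [PySem.List.sum_map_add_int L (wbG txt D wprev (idx : Int))
      (fun l => if l = (idx : Int) then bonus else 0)]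
  rw [sum_if_single L hL ((idx : Int)) bonus]
  rw [hidx]
  by_cases hidxL : (idx : Int) ∈ L
  · simp only [hidxL, if_true, hbonus]
    by_cases hc : PySem.Set.contains D (PySem.Str.slice txt (some 0) (some (idx : Int))) = true
    · simp only [hc, if_true]
      ring
    · simp only [hc, if_false]
      ring
  · have hcf : ¬ (PySem.Set.contains D (PySem.Str.slice txt (some 0) (some (idx : Int))) = true) := by
      intro hc
      have hsD : PySem.Str.slice txt (some 0) (some (idx : Int)) ∈ dict := by
        have := hc
        simp only [PySem.Set.contains, List.contains_eq_mem, decide_eq_true_eq] at this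
        exact (hmemD _).mp this
      apply hidxL
      rw [hmemL]
      refine ⟨_, hsD, ?_⟩
      have h0 : ((0 : Nat) : Int) = (0 : Int) := rfl
      have hlen : (PySem.Str.slice txt (some 0) (some (idx : Int))).toList.length = idx := by
        have := slice_len txt 0 idx (by omega) hn
        rw [h0] at this
        omega
      rw [PySem.Str.len_eq, hlen]
    simp only [hidxL, if_false, hbonus, hcf]
    simp

-- A's loop body, as folded by the port (proof-side name for it)
def aStep (txt : String) (WS : List String) (WL : List Int) (wbc : List Int) (idx : Int) :
    List Int :=
  PySem.List.pySetD wbc idx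
    (WL.foldl (fun v l =>
      if idx - l ≥ 0 then
        (if idx - l ≥ 0 ∧ PySem.Set.contains WS (PySem.Str.slice txt (some (idx - l)) (some idx))
         then v + PySem.List.pyGetD wbc (idx - l) 0
         else v)
      else v)
      (if PySem.Set.contains WS (PySem.Str.slice txt (some 0) (some idx))
       then PySem.List.pyGetD wbc idx 0 + 1
       else PySem.List.pyGetD wbc idx 0))

lemma aInner_eq_sum (txt : String) (WS : List String) (wbc : List Int) (idx : Int)
    (WL : List Int) (v1 : Int) :
    WL.foldl (fun v l =>
      if idx - l ≥ 0 then
        (if idx - l ≥ 0 ∧ PySem.Set.contains WS (PySem.Str.slice txt (some (idx - l)) (some idx))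
         then v + PySem.List.pyGetD wbc (idx - l) 0
         else v)
      else v) v1
    = v1 + (WL.map (wbG txt WS wbc idx)).sum := by
  have hstep : (fun (v : Int) (l : Int) =>
      if idx - l ≥ 0 then
        (if idx - l ≥ 0 ∧ PySem.Set.contains WS (PySem.Str.slice txt (some (idx - l)) (some idx))
         then v + PySem.List.pyGetD wbc (idx - l) 0
         else v)
      else v)
      = (fun (v : Int) (l : Int) => v + wbG txt WS wbc idx l) := by
    funext v l
    rw [wbG]
    by_cases hA : idx - l ≥ 0
    · by_cases hB : PySem.Set.contains WS (PySem.Str.slice txt (some (idx - l)) (some idx)) = true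
      · rw [if_pos hA, if_pos ⟨hA, hB⟩, if_pos ⟨hA, hB⟩]
      · rw [if_pos hA, if_neg (fun hc => hB hc.2), if_neg (fun hc => hB hc.2)]
        ring
    · rw [if_neg hA, if_neg (fun hc => hA hc.1)]
      ring
  rw [hstep, PySem.List.foldl_add]

lemma aLoop (dict : List String) (txt : String) (hpre : "" ∉ dict)
    (wbc0 : List Int) (hlen0 : wbc0.length = txt.toList.length + 1)
    (h00 : ∀ j : Nat, j ≤ txt.toList.length → PySem.List.pyGetD wbc0 (j : Int) 0 = 0)
    (k : Nat) (hk : k ≤ txt.toList.length) :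
    ((PySem.List.pyRange 1 ((k : Int) + 1) 1).foldl
        (aStep txt (PySem.Set.ofList dict) (PySem.Set.ofList (dict.map PySem.Str.len))) wbc0).length
      = txt.toList.length + 1
    ∧ ∀ j : Nat, j ≤ txt.toList.length →
        PySem.List.pyGetD
          ((PySem.List.pyRange 1 ((k : Int) + 1) 1).foldl
            (aStep txt (PySem.Set.ofList dict) (PySem.Set.ofList (dict.map PySem.Str.len))) wbc0)
          (j : Int) 0
        = (if j ≤ k then wbAltGo txt (PySem.Set.ofList dict) j else 0) := by
  induction k with
  | zero =>
      rw [show ((0 : Nat) : Int) + 1 = 1 from by norm_num, PySem.List.pyRange_one_eq_nil (by omega),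
        List.foldl_nil]
      refine ⟨hlen0, ?_⟩
      intro j hj
      rw [h00 j hj]
      by_cases hj0 : j ≤ 0
      · have : j = 0 := by omega
        simp [this, wbAltGo_zero]
      · simp [hj0]
  | succ k ih =>
      obtain ⟨ihlen, ihval⟩ := ih (by omega)
      have hsplit : PySem.List.pyRange 1 (((k + 1 : Nat) : Int) + 1) 1
          = PySem.List.pyRange 1 ((k : Int) + 1) 1 ++ [(k : Int) + 1] := by
        have hc : (((k + 1 : Nat) : Int) + 1) = ((k : Int) + 1) + 1 := by push_cast; ring
        rw [hc, PySem.List.pyRange_one_succ_right (by omega)]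
      rw [hsplit, List.foldl_append]
      set wk := (PySem.List.pyRange 1 ((k : Int) + 1) 1).foldl
        (aStep txt (PySem.Set.ofList dict) (PySem.Set.ofList (dict.map PySem.Str.len))) wbc0
        with hwk
      have hidxcast : ((k : Int) + 1) = (((k + 1 : Nat)) : Int) := by push_cast; ring
      have hcell : (if PySem.Set.contains (PySem.Set.ofList dict)
              (PySem.Str.slice txt (some 0) (some (((k + 1 : Nat)) : Int)))
           then PySem.List.pyGetD wk (((k + 1 : Nat)) : Int) 0 + 1
           else PySem.List.pyGetD wk (((k + 1 : Nat)) : Int) 0)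
          + ((PySem.Set.ofList (dict.map PySem.Str.len)).map
              (wbG txt (PySem.Set.ofList dict) wk (((k + 1 : Nat)) : Int))).sum
          = wbAltGo txt (PySem.Set.ofList dict) (k + 1) := by
        apply cell_eq dict txt hpre (k + 1) (by omega) (by omega) wk
        · intro j hj
          have := ihval j (by omega)
          rw [this, if_pos (by omega)]
        · have := ihval (k + 1) (by omega)
          rw [this, if_neg (by omega)]
      simp only [List.foldl_cons, List.foldl_nil, aStep]
      rw [aInner_eq_sum]
      constructor
      · rw [PySem.List.length_pySetD]
        exact ihlen
      · intro j hj
        have hklen : k + 1 < wk.length := by omega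
        rw [show ((k : Int) + 1) = (((k + 1 : Nat)) : Int) from hidxcast]
        rw [PySem.List.pyGetD_pySetD_natCast _ _ _ _ _ hklen]
        by_cases hjk : j = k + 1
        · subst hjk
          rw [if_pos (rfl : (k + 1 : Nat) = k + 1), if_pos (Nat.le_refl (k + 1))]
          exact hcell
        · rw [if_neg hjk]
          rw [ihval j hj]
          by_cases hjle : j ≤ k
          · rw [if_pos hjle, if_pos (by omega)]
          · rw [if_neg hjle, if_neg (by omega)]

lemma aLoop_zero (dict : List String) (txt : String) (hall : ∀ w ∈ dict, w = "")
    (wbc0 : List Int) (hlen0 : wbc0.length = txt.toList.length + 1)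
    (h00 : ∀ j : Nat, j ≤ txt.toList.length → PySem.List.pyGetD wbc0 (j : Int) 0 = 0)
    (k : Nat) (hk : k ≤ txt.toList.length) :
    ((PySem.List.pyRange 1 ((k : Int) + 1) 1).foldl
        (aStep txt (PySem.Set.ofList dict) (PySem.Set.ofList (dict.map PySem.Str.len))) wbc0).length
      = txt.toList.length + 1
    ∧ ∀ j : Nat, j ≤ txt.toList.length →
        PySem.List.pyGetD
          ((PySem.List.pyRange 1 ((k : Int) + 1) 1).foldl
            (aStep txt (PySem.Set.ofList dict) (PySem.Set.ofList (dict.map PySem.Str.len))) wbc0)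
          (j : Int) 0 = 0 := by
  induction k with
  | zero =>
      rw [show ((0 : Nat) : Int) + 1 = 1 from by norm_num, PySem.List.pyRange_one_eq_nil (by omega),
        List.foldl_nil]
      exact ⟨hlen0, h00⟩
  | succ k ih =>
      obtain ⟨ihlen, ihval⟩ := ih (by omega)
      have hsplit : PySem.List.pyRange 1 (((k + 1 : Nat) : Int) + 1) 1
          = PySem.List.pyRange 1 ((k : Int) + 1) 1 ++ [(k : Int) + 1] := by
        have hc : (((k + 1 : Nat) : Int) + 1) = ((k : Int) + 1) + 1 := by push_cast; ring
        rw [hc, PySem.List.pyRange_one_succ_right (by omega)]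
      rw [hsplit, List.foldl_append]
      set wk := (PySem.List.pyRange 1 ((k : Int) + 1) 1).foldl
        (aStep txt (PySem.Set.ofList dict) (PySem.Set.ofList (dict.map PySem.Str.len))) wbc0
        with hwk
      have hidxcast : ((k : Int) + 1) = (((k + 1 : Nat)) : Int) := by push_cast; ring
      -- the whole-prefix test fails: the prefix is nonempty, the dictionary's words are all ""
      have hv1 : (if PySem.Set.contains (PySem.Set.ofList dict)
            (PySem.Str.slice txt (some 0) (some (((k + 1 : Nat)) : Int)))
          then PySem.List.pyGetD wk (((k + 1 : Nat)) : Int) 0 + 1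
          else PySem.List.pyGetD wk (((k + 1 : Nat)) : Int) 0)
          = 0 := by
      
        rw [if_neg, ihval (k + 1) (by omega)]
        intro hc
        have hmem : PySem.Str.slice txt (some 0) (some (((k + 1 : Nat)) : Int)) ∈ dict := by
          have := hc
          simp only [PySem.Set.contains, List.contains_eq_mem, decide_eq_true_eq,
            PySem.Set.mem_ofList] at this
          exact this
        have hlen := slice_len txt 0 (k + 1) (by omega) (by omega)
        have := hall _ hmem
        rw [show ((0 : Nat) : Int) = (0 : Int) from rfl] at hlen
        rw [this] at hlen
        simp at hlen
      have hsum : ((PySem.Set.ofList (dict.map PySem.Str.len)).map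
          (wbG txt (PySem.Set.ofList dict) wk (((k + 1 : Nat)) : Int))).sum = 0 := by
        apply List.sum_eq_zero
        intro x hx
        obtain ⟨l, hl, rfl⟩ := List.mem_map.mp hx
        have hl0 : l = 0 := by
          rw [PySem.Set.mem_ofList, List.mem_map] at hl
          obtain ⟨w, hwmem, rfl⟩ := hl
          rw [hall w hwmem]
          rfl
        subst hl0
        rw [wbG]
        split_ifs with h
        · rw [show (((k + 1 : Nat)) : Int) - 0 = (((k + 1 : Nat)) : Int) from by ring]
          exact ihval (k + 1) (by omega)
        · rfl
      simp only [List.foldl_cons, List.foldl_nil, aStep]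
      rw [aInner_eq_sum]
      constructor
      · rw [PySem.List.length_pySetD]
        exact ihlen
      · intro j hj
        have hklen : k + 1 < wk.length := by omega
        rw [show ((k : Int) + 1) = (((k + 1 : Nat)) : Int) from hidxcast]
        rw [PySem.List.pyGetD_pySetD_natCast _ _ _ _ _ hklen]
        by_cases hjk : j = k + 1
        · rw [if_pos hjk, hv1, hsum]
          ring
        · rw [if_neg hjk]
          exact ihval j hj

-- ===== VERDICT (by name: the statement is the Claim_ definition above) =====
-- ===== VERDICT (by name: the statement is the Claim_ definition above) =====
theorem wordBreakCount_spec : Claim_equal_wordBreakCount := by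
  intro dict txt _ hpre
  unfold Spec_wordBreakCount
  have hsets : dict.foldl
      (fun (p : PySem.Set String × PySem.Set Int) word =>
        (PySem.Set.add p.1 word, PySem.Set.add p.2 (PySem.Str.len word)))
      (PySem.Set.empty, PySem.Set.empty)
      = (PySem.Set.ofList dict, PySem.Set.ofList (dict.map PySem.Str.len)) := by
    rw [PySem.List.foldl_prod_mk (f := fun s w => PySem.Set.add s w)
        (g := fun s w => PySem.Set.add s (PySem.Str.len w))]
    rw [Prod.mk.injEq]
    constructor
    · rw [PySem.Set.ofList_eq_foldl]
      rfl
    · rw [PySem.Set.ofList_eq_foldl, List.foldl_map]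
      rfl
  rw [wordBreakCount, wordBreakCount_alt, hsets, PySem.Str.len_eq]
  have hlen0 : ((PySem.List.pyRange 0 ((txt.toList.length : Int) + 1) 1).map
      (fun _ => (0 : Int))).length = txt.toList.length + 1 := by
    rw [List.length_map, PySem.List.length_pyRange_one]
    omega
  have h00 : ∀ j : Nat, j ≤ txt.toList.length →
      PySem.List.pyGetD ((PySem.List.pyRange 0 ((txt.toList.length : Int) + 1) 1).map
        (fun _ => (0 : Int))) (j : Int) 0 = 0 := by
    intro j hj
    rw [PySem.List.pyGetD_natCast]
    have : j < ((PySem.List.pyRange 0 ((txt.toList.length : Int) + 1) 1).map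
        (fun _ => (0 : Int))).length := by omega
    rw [List.getD_eq_getElem _ _ this]
    simp
  rcases hpre with hpre | hemp | hall
  · -- the ordinary case: no empty word in the dictionary
    obtain ⟨-, hval⟩ := aLoop dict txt hpre _ hlen0 h00 txt.toList.length (Nat.le_refl _)
    have hfin := hval txt.toList.length (Nat.le_refl _)
    rw [if_pos (Nat.le_refl _)] at hfin
    show PySem.Int.mod
        (PySem.List.pyGetD
          ((PySem.List.pyRange 1 ((txt.toList.length : Int) + 1) 1).foldl
            (aStep txt (PySem.Set.ofList dict) (PySem.Set.ofList (dict.map PySem.Str.len)))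
            ((PySem.List.pyRange 0 ((txt.toList.length : Int) + 1) 1).map (fun _ => (0 : Int))))
          ((txt.toList.length : Int)) 0) 1000000007
      = PySem.Int.mod (wbAltGo txt (PySem.Set.ofList dict) txt.toList.length) 1000000007
    rw [hfin]
  · -- txt = "": the loop is empty on both sides and both return 0 % p
    subst hemp
    have h0 : ("" : String).toList.length = 0 := rfl
    show PySem.Int.mod
        (PySem.List.pyGetD
          ((PySem.List.pyRange 1 ((("" : String).toList.length : Int) + 1) 1).foldl
            (aStep "" (PySem.Set.ofList dict) (PySem.Set.ofList (dict.map PySem.Str.len)))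
            ((PySem.List.pyRange 0 ((("" : String).toList.length : Int) + 1) 1).map
              (fun _ => (0 : Int))))
          ((("" : String).toList.length : Int)) 0) 1000000007
      = PySem.Int.mod (wbAltGo "" (PySem.Set.ofList dict) ("" : String).toList.length) 1000000007
    rw [h0] at h00 ⊢
    rw [wbAltGo_zero,
      show PySem.List.pyRange 1 (((0 : Nat) : Int) + 1) 1 = []
        from PySem.List.pyRange_one_eq_nil (by norm_num),
      List.foldl_nil]
    rw [h00 0 (Nat.le_refl 0)]
  · -- every dictionary word is "": every cell stays 0 on both sides
    obtain ⟨-, hval⟩ := aLoop_zero dict txt hall _ hlen0 h00 txt.toList.length (Nat.le_refl _)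
    have hfin := hval txt.toList.length (Nat.le_refl _)
    rw [wbAltGo_all_empty txt (PySem.Set.ofList dict)
      (fun w hw => hall w ((PySem.Set.mem_ofList dict w).mp hw))]
    show PySem.Int.mod
        (PySem.List.pyGetD
          ((PySem.List.pyRange 1 ((txt.toList.length : Int) + 1) 1).foldl
            (aStep txt (PySem.Set.ofList dict) (PySem.Set.ofList (dict.map PySem.Str.len)))
            ((PySem.List.pyRange 0 ((txt.toList.length : Int) + 1) 1).map (fun _ => (0 : Int))))
          ((txt.toList.length : Int)) 0) 1000000007
      = PySem.Int.mod 0 1000000007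
    rw [hfin]
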